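-- pv_equiv track=rewrite | github.com/JJ/python-ejemplos-intef | multiplos_de_tres.py | is_multiple_of_3
-- ===== SOURCE A (Python) =====
-- def suma_cifras(n):
--     return sum(map(int, list(str(n))))
--
-- def is_multiple_of_3(n):
--     sum = suma_cifras(n)
--     if (sum >= 10):
--         return is_multiple_of_3(sum)
--     else:
--         if (sum == 3) or (sum == 6) or (sum == 9):
--             return True
--         else:
--             return False
-- ===== SOURCE B (Python) =====
-- def suma_cifras(n):
--     return sum(map(int, list(str(n))))
--
-- def is_multiple_of_3(n):
--     s = suma_cifras(n)
--     while s >= 10: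
--         s = suma_cifras(s)
--     return s in (3, 6, 9)
-- ===== Notes on version B (the rewrite author's own statement) =====
-- stated objective: simpler
-- what changed: Replaced A's recursion on the digit sum by an explicit while-loop that iterates the digit sum to a single digit, then a single membership test s in (3, 6, 9).
import Mathlib
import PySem

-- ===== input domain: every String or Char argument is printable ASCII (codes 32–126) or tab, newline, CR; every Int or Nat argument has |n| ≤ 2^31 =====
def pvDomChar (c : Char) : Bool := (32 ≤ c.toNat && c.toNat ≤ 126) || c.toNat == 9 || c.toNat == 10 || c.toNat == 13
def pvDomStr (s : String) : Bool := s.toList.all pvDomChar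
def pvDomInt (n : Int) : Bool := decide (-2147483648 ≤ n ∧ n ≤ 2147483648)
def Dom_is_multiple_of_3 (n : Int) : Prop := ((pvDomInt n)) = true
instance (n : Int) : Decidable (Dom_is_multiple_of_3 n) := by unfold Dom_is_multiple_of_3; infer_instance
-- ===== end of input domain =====

-- B rewrites A's recursion on the digit sum as an explicit while-loop plus one membership test
-- (objective: simpler). A raises ValueError on n < 0 (int('-')), excluded by Pre_.

-- ===== PORT A =====
-- suma_cifras(n) = sum(map(int, list(str(n)))).  int(c) is PySem.Int.ofStr?; it is none only
-- for the '-' character of a negative n, which Pre_is_multiple_of_3 excludes, so the .getD 0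
-- default is never reached inside Pre_.
def suma_cifras (n : Int) : Int :=
  ((PySem.Int.toStr n).toList.map
    (fun c => (PySem.Int.ofStr? (String.mk [c])).getD 0)).foldl (· + ·) 0

-- A's recursion: sum = suma_cifras n; if sum >= 10 recurse on sum, else test membership.
-- fuel is only a totality guard (n.natAbs + 1 always suffices: the digit sum of n strictly
-- shrinks while it stays ≥ 10).
def isM3_rec (fuel : Nat) (n : Int) : Bool :=
  let s := suma_cifras n
  if 10 ≤ s then
    match fuel with
    | 0 => false
    | f + 1 => isM3_rec f s
  else
    s == 3 || s == 6 || s == 9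

def is_multiple_of_3 (n : Int) : Bool := isM3_rec (n.natAbs + 1) n

-- ===== PORT B =====
-- B's while-loop: while s >= 10: s = suma_cifras s.  Same fuel-style totality guard.
def isM3_loop (fuel : Nat) (s : Int) : Int :=
  if 10 ≤ s then
    match fuel with
    | 0 => s
    | f + 1 => isM3_loop f (suma_cifras s)
  else
    s

def is_multiple_of_3_alt (n : Int) : Bool :=
  let s := isM3_loop (n.natAbs + 1) (suma_cifras n)
  s == 3 || s == 6 || s == 9

-- ===== PRECONDITION & SPEC =====
-- Pre_ excludes n < 0, on which the Python A raises ValueError (int('-') inside suma_cifras).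
def Pre_is_multiple_of_3 (n : Int) : Prop := 0 ≤ n
instance (n : Int) : Decidable (Pre_is_multiple_of_3 n) := by unfold Pre_is_multiple_of_3; infer_instance
def pvWitness_is_multiple_of_3 : Int := (9)

def Spec_is_multiple_of_3 (n : Int) (out : Bool) : Prop := out = is_multiple_of_3_alt n
instance (n : Int) (out : Bool) : Decidable (Spec_is_multiple_of_3 n out) := by unfold Spec_is_multiple_of_3; infer_instance

-- ===== CLAIM (what is proved, stated in full; the proofs are below) =====
def Claim_equal_is_multiple_of_3 : Prop := ∀ (n : Int), Dom_is_multiple_of_3 n → Pre_is_multiple_of_3 n → Spec_is_multiple_of_3 n (is_multiple_of_3 n)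

-- ===== LEMMAS AND PROOFS =====

-- A's recursion with fuel f equals: run B's loop with the same fuel on suma_cifras n,
-- then do the membership test (on fuel exhaustion both sides give false, since the
-- leftover s is ≥ 10 and hence not 3, 6 or 9).
theorem isM3_rec_eq_loop (f : Nat) (n : Int) :
    isM3_rec f n = (let s := isM3_loop f (suma_cifras n); s == 3 || s == 6 || s == 9) := by
  induction f generalizing n with
  | zero =>
    simp only [isM3_rec, isM3_loop]
    by_cases h : 10 ≤ suma_cifras n
    · simp only [if_pos h]
      have h3 : (suma_cifras n == 3) = false := by simp; omega
      have h6 : (suma_cifras n == 6) = false := by simp; omega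
      have h9 : (suma_cifras n == 9) = false := by simp; omega
      simp [h3, h6, h9]
    · simp [if_neg h]
  | succ f ih =>
    simp only [isM3_rec, isM3_loop]
    by_cases h : 10 ≤ suma_cifras n
    · simp only [if_pos h]
      exact ih (suma_cifras n)
    · simp [if_neg h]

-- ===== VERDICT (by name: the statement is the Claim_ definition above) =====
theorem is_multiple_of_3_spec : Claim_equal_is_multiple_of_3 := by
  intro n _ _
  unfold Spec_is_multiple_of_3 is_multiple_of_3 is_multiple_of_3_alt
  exact isM3_rec_eq_loop (n.natAbs + 1) n
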